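-- pv_equiv track=rewrite | github.com/ADicksonLab/wepy | wepy/analysis/parents.py | net_parent_table
-- ===== SOURCE A (Python) =====
-- def net_parent_table(parent_panel):
--
--     net_parent_table_in = []
--
--     # each cycle
--     for cycle_idx, step_parent_table in enumerate(parent_panel):
--         # for the net table we only want the end results,
--         # we start at the last cycle and look at its parent
--         step_net_parents = []
--         n_steps = len(step_parent_table)
--         for walker_idx, parent_idx in enumerate(step_parent_table[-1]):
--             # initialize the root_parent_idx which will be updated
--             root_parent_idx = parent_idx
--
--             # if no resampling skip the loop and just return the idx
--             if n_steps > 0: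
--                 # go back through the steps getting the parent at each step
--                 for prev_step_idx in range(n_steps):
--                     prev_step_parents = step_parent_table[-(prev_step_idx+1)]
--                     root_parent_idx = prev_step_parents[root_parent_idx]
--
--             # when this is done we should have the index of the root parent,
--             # save this as the net parent index
--             step_net_parents.append(root_parent_idx)
--
--         # for this step save the net parents
--         net_parent_table_in.append(step_net_parents)
--
--     return net_parent_table_in
-- ===== SOURCE B (Python) =====
-- def net_parent_table(parent_panel):
--     # Build the composed parent map for each cycle by forward relational
--     # composition (comp[i] = net root of walker slot i after the steps seen so
--     # far), then apply it once to the last step's table; composition is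
--     # associative, so this equals chasing each walker's chain backwards.
--     net = []
--     for steps in parent_panel:
--         last = steps[-1]
--         if not last:
--             # no walkers in this cycle: nothing to compose
--             net.append([])
--             continue
--         comp = steps[0]
--         for table in steps[1:]:
--             comp = [comp[x] for x in table]
--         net.append([comp[x] for x in last])
--     return net
-- ===== Notes on version B (the rewrite author's own statement) =====
-- stated objective: alternative
-- what changed: B builds each cycle's composed parent map once by forward relational composition (comp = steps[0]; comp = [comp[x] for x in table] for each later table) and then applies that map to the last step's table, instead of A's per-walker scalar chase backwards through the steps with negative step indexing; correctness rests on associativity of map composition.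
-- outside the precondition, e.g. on net_parent_table([[[0, 0], [9, 0], [1, 1]]]): A returns [[0, 0]], B raises IndexError; on net_parent_table([[]]): A raises IndexError, B raises IndexError
import Mathlib
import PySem

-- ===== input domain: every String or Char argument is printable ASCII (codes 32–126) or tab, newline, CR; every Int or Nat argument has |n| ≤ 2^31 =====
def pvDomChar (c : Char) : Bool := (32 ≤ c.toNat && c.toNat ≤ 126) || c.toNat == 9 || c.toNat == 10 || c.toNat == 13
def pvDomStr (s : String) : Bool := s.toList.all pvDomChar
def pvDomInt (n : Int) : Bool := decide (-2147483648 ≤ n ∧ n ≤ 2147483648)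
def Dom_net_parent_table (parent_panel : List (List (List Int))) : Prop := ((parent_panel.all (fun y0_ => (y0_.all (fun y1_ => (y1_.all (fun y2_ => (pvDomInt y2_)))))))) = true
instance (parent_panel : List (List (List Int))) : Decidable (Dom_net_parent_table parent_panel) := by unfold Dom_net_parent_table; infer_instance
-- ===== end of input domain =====

-- B replaces A's per-walker backward index-chase by forward relational composition:
-- it builds each cycle's composed parent map once (comp[i] = root of slot i) and applies
-- it to the last step's table; same asymptotic cost, different decomposition.


-- ===== PORT A =====
-- one cycle of A: for each walker_idx, parent_idx in enumerate(step_parent_table[-1]),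
-- chase the chain back through range(n_steps) with negative step indexing (walker_idx unused)
def pvA_cycle (t : List (List Int)) : List Int :=
  let n : Nat := t.length
  (PySem.List.pyGetD t (-1) []).map (fun parent_idx =>
    if n > 0 then
      (PySem.List.pyRange 0 (n : Int) 1).foldl
        (fun root_parent_idx prev_step_idx =>
          PySem.List.pyGetD (PySem.List.pyGetD t (-(prev_step_idx + 1)) []) root_parent_idx 0)
        parent_idx
    else parent_idx)

def net_parent_table (parent_panel : List (List (List Int))) : List (List Int) :=
  parent_panel.map pvA_cycle

-- ===== PORT B =====
-- one cycle of B: last = steps[-1]; if not last: []; else comp = steps[0];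
-- for table in steps[1:]: comp = [comp[x] for x in table]; [comp[x] for x in last]
def pvB_cycle (t : List (List Int)) : List Int :=
  let last := PySem.List.pyGetD t (-1) []
  if last.isEmpty then []
  else
    let comp := (t.drop 1).foldl
      (fun comp table => table.map (fun x => PySem.List.pyGetD comp x 0))
      (PySem.List.pyGetD t 0 [])
    last.map (fun x => PySem.List.pyGetD comp x 0)

def net_parent_table_alt (parent_panel : List (List (List Int))) : List (List Int) :=
  parent_panel.map pvB_cycle

-- ===== PRECONDITION & SPEC =====
-- every entry of `nxt` is a valid (possibly negative) Python index for a list of length L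
def pvStepOk (L : Nat) (nxt : List Int) : Bool :=
  nxt.all (fun e => decide (-(L : Int) ≤ e ∧ e < (L : Int)))

-- each step's entries are valid indices into the preceding step's list
def pvChainOk : Nat → List (List Int) → Bool
  | _, [] => true
  | L, t :: rest => pvStepOk L t && pvChainOk t.length rest

-- Pre_ excludes panels where some cycle has no steps (A raises IndexError on t[-1]) or where
-- some step's entries are not valid (possibly negative) Python indices into the preceding step
-- (or, for the last step, into itself) while the last step is nonempty, so A may raise
-- IndexError; on excluded panels whose backward chains happen to dodge the invalid entries A
-- still returns, while B's eager forward composition touches every entry and raises.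
def Pre_net_parent_table (parent_panel : List (List (List Int))) : Prop :=
  (parent_panel.all (fun t =>
    !t.isEmpty &&
    ((t.getLastD []).isEmpty ||
     (pvStepOk (t.getLastD []).length (t.getLastD []) &&
      pvChainOk (t.headD []).length (t.drop 1))))) = true
instance (parent_panel : List (List (List Int))) : Decidable (Pre_net_parent_table parent_panel) := by unfold Pre_net_parent_table; infer_instance

def pvWitness_net_parent_table : List (List (List Int)) := [[[0, 1], [1, 0]], [[0]]]

def Spec_net_parent_table (parent_panel : List (List (List Int))) (out : List (List Int)) : Prop := out = net_parent_table_alt parent_panel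
instance (parent_panel : List (List (List Int))) (out : List (List Int)) : Decidable (Spec_net_parent_table parent_panel out) := by unfold Spec_net_parent_table; infer_instance

-- ===== CLAIM (what is proved, stated in full; the proofs are below) =====
def Claim_equal_net_parent_table : Prop := ∀ (parent_panel : List (List (List Int))), Dom_net_parent_table parent_panel → Pre_net_parent_table parent_panel → Spec_net_parent_table parent_panel (net_parent_table parent_panel)

-- ===== LEMMAS AND PROOFS =====

-- last length reached by walking a chain of tables starting from default length d
def pvLastLen (d : Nat) : List (List Int) → Nat
  | [] => d
  | t :: rest => pvLastLen t.length rest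

-- indexing a mapped list with a valid (possibly negative) Python index commutes with the map
theorem pv_lk_map (f : Int → Int) (t : List Int) (x : Int)
    (h0 : -(t.length : Int) ≤ x) (h1 : x < (t.length : Int)) :
    PySem.List.pyGetD (t.map f) x 0 = f (PySem.List.pyGetD t x 0) := by
  by_cases hx : 0 ≤ x
  · rw [PySem.List.pyGetD_eq_getElem _ _ hx (by simpa using h1),
        PySem.List.pyGetD_eq_getElem _ _ hx h1]
    simp
  · have hk : x = -(((-x).toNat : Nat) : Int) := by omega
    rw [hk, PySem.List.pyGetD_neg_natCast (t.map f) _ 0 (by omega) (by simp; omega),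
        PySem.List.pyGetD_neg_natCast t _ 0 (by omega) (by omega)]
    simp

-- invariant of B's forward composition: after folding a valid chain of tables over comp,
-- looking up a valid index equals F applied to A's backward chain through those tables
theorem pv_comp_spec : ∀ (rest : List (List Int)) (comp : List Int) (F : Int → Int),
    (∀ x : Int, -(comp.length : Int) ≤ x → x < (comp.length : Int) →
      PySem.List.pyGetD comp x 0 = F x) →
    pvChainOk comp.length rest = true →
    ∀ x : Int, -((pvLastLen comp.length rest : Nat) : Int) ≤ x →
      x < ((pvLastLen comp.length rest : Nat) : Int) →
      PySem.List.pyGetD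
        (rest.foldl (fun c tk => tk.map (fun y => PySem.List.pyGetD c y 0)) comp) x 0
        = F (rest.foldr (fun tb r => PySem.List.pyGetD tb r 0) x) := by
  intro rest
  induction rest with
  | nil => intro comp F hF _ x h0 h1; simpa [pvLastLen] using hF x h0 h1
  | cons t rest ih =>
      intro comp F hF hok x h0 h1
      simp only [pvChainOk, Bool.and_eq_true] at hok
      obtain ⟨hstep, hchain⟩ := hok
      have hF' : ∀ y : Int, -(((t.map (fun y => PySem.List.pyGetD comp y 0)).length : Int)) ≤ y →
          y < ((t.map (fun y => PySem.List.pyGetD comp y 0)).length : Int) →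
          PySem.List.pyGetD (t.map (fun y => PySem.List.pyGetD comp y 0)) y 0
            = F (PySem.List.pyGetD t y 0) := by
        intro y hy0 hy1
        simp only [List.length_map] at hy0 hy1
        rw [pv_lk_map _ t y hy0 hy1]
        have hmem : PySem.List.pyGetD t y 0 ∈ t :=
          PySem.List.pyGetD_mem t 0 ⟨hy0, hy1⟩
        have := List.all_eq_true.mp hstep _ hmem
        have hb := of_decide_eq_true this
        exact hF _ hb.1 hb.2
      have hlen : pvLastLen (t.map (fun y => PySem.List.pyGetD comp y 0)).length rest
          = pvLastLen t.length rest := by simp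
      have := ih (t.map (fun y => PySem.List.pyGetD comp y 0)) (fun z => F (PySem.List.pyGetD t z 0))
        hF' (by simpa using hchain) x (by rw [hlen]; simpa [pvLastLen] using h0)
        (by rw [hlen]; simpa [pvLastLen] using h1)
      simpa [pvLastLen] using this

-- A's range(n)-with-negative-indexing chain is the fold over the reversed step list
theorem pv_chain_eq_reverse (t : List (List Int)) (p : Int) :
    (PySem.List.pyRange 0 (t.length : Int) 1).foldl
        (fun root k => PySem.List.pyGetD (PySem.List.pyGetD t (-(k + 1)) []) root 0) p
      = t.reverse.foldl (fun r table => PySem.List.pyGetD table r 0) p := by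
  have hlen : ((t.length : Int)) = (t.reverse.length : Int) := by simp
  rw [hlen]
  rw [PySem.List.foldl_congr_mem
    (g := fun root j => PySem.List.pyGetD (PySem.List.pyGetD t.reverse j []) root 0)]
  · exact PySem.List.foldl_pyRange_zero_pyGetD' t.reverse []
      (fun r table => PySem.List.pyGetD table r 0) p
  · intro acc j hj
    rw [PySem.List.mem_pyRange_one] at hj
    obtain ⟨h0, h1⟩ := hj
    have hk1 : -(j + 1) = -(((j.toNat + 1 : Nat) : Int)) := by omega
    rw [hk1, PySem.List.pyGetD_neg_natCast t (j.toNat + 1) [] (by omega) (by omega),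
        PySem.List.pyGetD_eq_getElem t.reverse [] h0 (by simpa using h1)]
    rw [List.getElem_reverse]
    have hidx : t.length - (j.toNat + 1) = t.length - 1 - j.toNat := by omega
    simp only [hidx]

-- pvLastLen along the tail of a nonempty chain is the length of the last table
theorem pv_lastLen_eq_getLast : ∀ (ts : List (List Int)) (t0 : List Int),
    pvLastLen t0.length ts = ((t0 :: ts).getLastD []).length := by
  intro ts
  induction ts with
  | nil => intro t0; simp [pvLastLen]
  | cons t ts ih => intro t0; simpa [pvLastLen] using ih t

-- per-cycle equality under the cycle's precondition
theorem pv_cycle_eq (t : List (List Int))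
    (h : (!t.isEmpty &&
      ((t.getLastD []).isEmpty ||
       (pvStepOk (t.getLastD []).length (t.getLastD []) &&
        pvChainOk (t.headD []).length (t.drop 1)))) = true) :
    pvA_cycle t = pvB_cycle t := by
  simp only [Bool.and_eq_true, Bool.or_eq_true, Bool.not_eq_eq_eq_not] at h
  obtain ⟨hne, hrest⟩ := h
  obtain ⟨t0, ts, rfl⟩ : ∃ t0 ts, t = t0 :: ts := by
    cases t with
    | nil => simp at hne
    | cons a l => exact ⟨a, l, rfl⟩
  have hlast : PySem.List.pyGetD (t0 :: ts) (-1) ([] : List Int)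
      = (t0 :: ts).getLastD [] := by
    rcases List.eq_nil_or_concat (t0 :: ts) with h | ⟨xs, x, h⟩
    · simp at h
    · rw [h, List.concat_eq_append, PySem.List.pyGetD_neg_one_append_singleton]
      simp
  unfold pvA_cycle pvB_cycle
  simp only [hlast]
  by_cases hemp : ((t0 :: ts).getLastD []).isEmpty = true
  · -- last step empty: A maps over [], B short-circuits to []
    have h0 : (t0 :: ts).getLastD [] = [] := by simpa using hemp
    rw [h0]
    simp
  · have hok : (pvStepOk ((t0 :: ts).getLastD []).length ((t0 :: ts).getLastD []) &&
        pvChainOk ((t0 :: ts).headD []).length (List.drop 1 (t0 :: ts))) = true := by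
      rcases hrest with h | h
      · exact absurd h hemp
      · rw [Bool.and_eq_true]; exact ⟨h.1, h.2⟩
    rw [Bool.and_eq_true] at hok
    obtain ⟨hstep, hchain⟩ := hok
    rw [if_neg (by simpa using hemp)]
    apply List.map_congr_left
    intro p hp
    have hn : (t0 :: ts).length > 0 := by simp
    simp only [if_pos hn]
    -- p is an entry of the last table, hence a valid index into it
    have hpv := of_decide_eq_true (List.all_eq_true.mp hstep _ hp)
    -- B side: composition invariant with comp = t0, F = lookup in t0
    have hB := pv_comp_spec ts t0 (fun x => PySem.List.pyGetD t0 x 0)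
      (fun _ _ _ => rfl) (by simpa using hchain) p
      (by rw [pv_lastLen_eq_getLast]; exact_mod_cast hpv.1)
      (by rw [pv_lastLen_eq_getLast]; exact_mod_cast hpv.2)
    have hhead : PySem.List.pyGetD (t0 :: ts) 0 ([] : List Int) = t0 := by
      simp [PySem.List.pyGetD_zero]
    simp only [List.drop_one, List.tail_cons] at hB ⊢
    rw [hhead, hB]
    -- A side: range chain = reverse fold = foldr
    rw [pv_chain_eq_reverse (t0 :: ts) p, List.foldl_reverse]
    simp [List.foldr]

-- ===== VERDICT (by name: the statement is the Claim_ definition above) =====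
theorem net_parent_table_spec : Claim_equal_net_parent_table := by
  intro pp _ hpre
  unfold Spec_net_parent_table net_parent_table net_parent_table_alt
  unfold Pre_net_parent_table at hpre
  exact List.map_congr_left (fun t ht => pv_cycle_eq t (List.all_eq_true.mp hpre t ht))
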